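-- pv_equiv track=rewrite | github.com/MrBrantCode/unitest_baseline | mut_generate/mist_train_cf/cf_9216/solution.py | convert_string
-- ===== SOURCE A (Python) =====
-- def convert_string(n):
--     arr = ["hello"] * n
--     vowels = ['a', 'e', 'i', 'o', 'u']
--
--     for i in range(n):
--         converted_str = ''
--         for char in arr[i]:
--             if char.lower() in vowels:
--                 converted_str += char.upper()
--             else:
--                 converted_str += char.lower()
--         arr[i] = converted_str
--
--     return arr
-- ===== SOURCE B (Python) =====
-- def convert_string(n):
--     s = ''
--     for ch in "hello":
--         s += ch.upper() if ch.lower() in 'aeiou' else ch.lower()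
--     return [s] * n
-- ===== Notes on version B (the rewrite author's own statement) =====
-- stated objective: simpler
-- what changed: B converts the constant string "hello" once and replicates the result n times, instead of A's outer loop over n repeating the per-character conversion and list rewrite for every element.
import Mathlib
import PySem

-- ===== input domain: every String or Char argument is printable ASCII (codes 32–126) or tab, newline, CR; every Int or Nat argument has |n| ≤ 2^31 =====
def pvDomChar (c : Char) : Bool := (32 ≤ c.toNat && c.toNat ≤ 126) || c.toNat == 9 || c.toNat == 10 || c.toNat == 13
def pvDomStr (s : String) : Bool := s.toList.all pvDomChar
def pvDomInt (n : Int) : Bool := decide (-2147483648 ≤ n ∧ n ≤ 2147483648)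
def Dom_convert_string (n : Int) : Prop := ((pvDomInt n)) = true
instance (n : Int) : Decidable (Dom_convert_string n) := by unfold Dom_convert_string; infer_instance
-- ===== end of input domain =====

-- B converts the constant string "hello" once and replicates it n times; A redoes the per-character conversion for every element.

-- ===== PORT A =====
-- converted_str accumulation of A's inner loop (char.lower() in vowels → upper, else lower)
def pvConvStep (acc : String) (c : Char) : String :=
  if PySem.Chars.lowerChar c ∈ ['a', 'e', 'i', 'o', 'u'] then
    acc ++ String.singleton (PySem.Chars.upperChar c)
  else
    acc ++ String.singleton (PySem.Chars.lowerChar c)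

def convert_string (n : Int) : List String :=
  let arr := PySem.List.pyRepeat ["hello"] n
  (PySem.List.pyRange 0 n 1).foldl
    (fun arr i =>
      let convertedStr := (PySem.List.pyGetD arr i "").toList.foldl pvConvStep ""
      arr.set i.toNat convertedStr)
    arr

-- ===== PORT B =====
def convert_string_alt (n : Int) : List String :=
  let s := "hello".toList.foldl
    (fun acc ch =>
      acc ++ (if PySem.Chars.lowerChar ch ∈ "aeiou".toList then
                String.singleton (PySem.Chars.upperChar ch)
              else
                String.singleton (PySem.Chars.lowerChar ch))) ""
  PySem.List.pyRepeat [s] n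

-- ===== PRECONDITION & SPEC =====
def Spec_convert_string (n : Int) (out : List String) : Prop := out = convert_string_alt n
instance (n : Int) (out : List String) : Decidable (Spec_convert_string n out) := by unfold Spec_convert_string; infer_instance

-- ===== CLAIM (what is proved, stated in full; the proofs are below) =====
def Claim_equal_convert_string : Prop := ∀ (n : Int), Dom_convert_string n → Spec_convert_string n (convert_string n)

-- ===== LEMMAS AND PROOFS =====

-- A's inner loop applied to "hello" yields "hEllO" (closed computation)
lemma pvConv_hello : ("hello".toList.foldl pvConvStep "") = "hEllO" := by decide

-- the loop invariant of A's outer loop: after processing indices [0, a), the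
-- first a entries are converted and the rest still "hello"
lemma pvLoop_inv (k : Nat) : ∀ (a : Int), 0 ≤ a →
    (PySem.List.pyRange a (a + k) 1).foldl
      (fun arr i =>
        let convertedStr := (PySem.List.pyGetD arr i "").toList.foldl pvConvStep ""
        arr.set i.toNat convertedStr)
      (List.replicate a.toNat "hEllO" ++ List.replicate k "hello")
      = List.replicate (a.toNat + k) "hEllO" := by
  induction k with
  | zero =>
    intro a ha
    rw [show a + (0 : Nat) = a by push_cast; ring, PySem.List.pyRange_one_eq_nil (le_refl a)]
    simp
  | succ k ih =>
    intro a ha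
    have hlt : a < a + (k + 1 : Nat) := by push_cast; omega
    rw [PySem.List.pyRange_one_cons hlt]
    simp only [List.foldl_cons]
    have hget : PySem.List.pyGetD
        (List.replicate a.toNat "hEllO" ++ List.replicate (k + 1) "hello") a "" = "hello" := by
      rw [PySem.List.pyGetD_eq_getElem _ _ ha (by simp; omega)]
      rw [List.getElem_append_right (by simp)]
      simp
    rw [hget, pvConv_hello]
    have hset : (List.replicate a.toNat "hEllO" ++ List.replicate (k + 1) "hello").set a.toNat "hEllO"
        = List.replicate (a + 1).toNat "hEllO" ++ List.replicate k "hello" := by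
      rw [List.replicate_succ, List.set_append_right _ _ (by simp),
          show (a + 1).toNat = a.toNat + 1 by omega, List.replicate_succ']
      simp
    rw [hset, show a + (k + 1 : Nat) = (a + 1) + (k : Nat) by push_cast; ring,
        ih (a + 1) (by omega)]
    congr 1
    omega

lemma pvA_closed (n : Int) : convert_string n = List.replicate n.toNat "hEllO" := by
  unfold convert_string
  rw [PySem.List.pyRepeat_singleton]
  by_cases h : n ≤ 0
  · rw [PySem.List.pyRange_one_eq_nil h]
    simp [show n.toNat = 0 by omega]
  · have h0 : (0 : Int) ≤ 0 := le_refl 0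
    have := pvLoop_inv n.toNat 0 h0
    rw [show (0 : Int) + (n.toNat : Int) = n by omega] at this
    simpa using this

lemma pvB_closed (n : Int) : convert_string_alt n = List.replicate n.toNat "hEllO" := by
  unfold convert_string_alt
  rw [PySem.List.pyRepeat_singleton]
  congr 1

-- ===== VERDICT (by name: the statement is the Claim_ definition above) =====
theorem convert_string_spec : Claim_equal_convert_string := by
  intro n _
  unfold Spec_convert_string
  rw [pvA_closed, pvB_closed]
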